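-- pv_equiv track=rewrite | github.com/Dayanamarinquinto/Mileny-Dayana-Marin-Quinto | Tarea #2.py | ordenar_matriz
-- ===== SOURCE A (Python) =====
-- def ordenar_matriz(m):
--     lista_plana = [num for fila in m for num in fila]
--     n = len(lista_plana)
--     for i in range(n-1):
--         for j in range(n - i -1):
--             if lista_plana[j] > lista_plana[j+1]:
--                 lista_plana[j], lista_plana[j+1] = lista_plana[j+1], lista_plana[j]
--     return lista_plana  # Devuelve la lista ordenada
-- ===== SOURCE B (Python) =====
-- def ordenar_matriz(m):
--     return sorted(num for fila in m for num in fila)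
-- ===== Notes on version B (the rewrite author's own statement) =====
-- stated objective: idiomatic
-- what changed: Replaces the flatten-into-a-list plus hand-written bubble sort (two nested index loops with swaps) by a single call to the built-in stable sorted() over a flattening generator.
import Mathlib
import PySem

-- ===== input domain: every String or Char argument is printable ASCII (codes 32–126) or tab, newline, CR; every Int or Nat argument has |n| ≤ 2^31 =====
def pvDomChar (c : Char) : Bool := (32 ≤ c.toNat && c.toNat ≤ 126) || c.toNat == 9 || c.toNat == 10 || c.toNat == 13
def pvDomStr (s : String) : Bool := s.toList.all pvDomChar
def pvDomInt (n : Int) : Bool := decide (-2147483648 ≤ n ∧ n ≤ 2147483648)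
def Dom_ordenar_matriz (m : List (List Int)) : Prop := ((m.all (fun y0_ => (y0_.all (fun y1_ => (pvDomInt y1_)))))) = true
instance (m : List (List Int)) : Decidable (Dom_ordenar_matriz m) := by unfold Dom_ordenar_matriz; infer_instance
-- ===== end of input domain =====

-- B replaces A's hand-written bubble sort over the flattened matrix by the built-in stable sort (idiomatic).


-- ===== PORT A =====
-- [num for fila in m for num in fila], then bubble sort with two index loops and swaps
def ordenar_matriz (m : List (List Int)) : List Int :=
  let lista_plana : List Int :=
    m.foldl (fun acc fila => fila.foldl (fun acc num => acc ++ [num]) acc) []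
  let n : Int := lista_plana.length
  (PySem.List.pyRange 0 (n - 1) 1).foldl (fun l i =>
    (PySem.List.pyRange 0 (n - i - 1) 1).foldl (fun l j =>
      if PySem.List.pyGetD l (j + 1) 0 < PySem.List.pyGetD l j 0 then
        PySem.List.pySetD (PySem.List.pySetD l j (PySem.List.pyGetD l (j + 1) 0)) (j + 1)
          (PySem.List.pyGetD l j 0)
      else l) l) lista_plana

-- ===== PORT B =====
-- return sorted(num for fila in m for num in fila)
def ordenar_matriz_alt (m : List (List Int)) : List Int :=
  PySem.List.sorted (m.flatMap (fun fila => fila)) (fun num => num)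

-- ===== PRECONDITION & SPEC =====
def Spec_ordenar_matriz (m : List (List Int)) (out : List Int) : Prop := out = ordenar_matriz_alt m
instance (m : List (List Int)) (out : List Int) : Decidable (Spec_ordenar_matriz m out) := by unfold Spec_ordenar_matriz; infer_instance

-- ===== CLAIM (what is proved, stated in full; the proofs are below) =====
def Claim_equal_ordenar_matriz : Prop := ∀ (m : List (List Int)), Dom_ordenar_matriz m → Spec_ordenar_matriz m (ordenar_matriz m)

-- ===== LEMMAS AND PROOFS =====

-- One bubble-sort comparison/swap at Nat index j (the body of A's inner loop, Nat-indexed).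
def nstep (l : List Int) (j : Nat) : List Int :=
  if l.getD (j + 1) 0 < l.getD j 0 then (l.set j (l.getD (j + 1) 0)).set (j + 1) (l.getD j 0)
  else l

-- A's inner loop: comparisons at indices 0..k-1 (one bubble pass over the first k+1 slots).
def bpassK : Nat → List Int → List Int
  | 0, l => l
  | _ + 1, [] => []
  | _ + 1, [a] => [a]
  | k + 1, a :: b :: t => if b < a then b :: bpassK k (a :: t) else a :: bpassK k (b :: t)

-- A's outer loop: passes of widths k, k-1, ..., 1.
def passes : Nat → List Int → List Int
  | 0, l => l
  | k + 1, l => passes k (bpassK (k + 1) l)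

lemma nstep_cons_succ (x : Int) (r : List Int) (j : Nat) :
    nstep (x :: r) (j + 1) = x :: nstep r j := by
  simp only [nstep, List.getD_cons_succ, List.set_cons_succ]
  split <;> rfl

lemma foldl_nstep_cons (x : Int) (r : List Int) (js : List Nat) :
    js.foldl (fun l t => nstep l (t + 1)) (x :: r) = x :: js.foldl nstep r := by
  induction js generalizing r with
  | nil => rfl
  | cons j js ih => simp [List.foldl_cons, nstep_cons_succ, ih]

lemma range_foldl_nstep_eq_bpassK (k : Nat) (l : List Int) (h : k < l.length ∨ k = 0) :
    (List.range k).foldl nstep l = bpassK k l := by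
  induction k generalizing l with
  | zero => rfl
  | succ k ih =>
    have hlt : k + 1 < l.length := by omega
    match l, hlt with
    | a :: b :: t, hlt =>
      rw [List.range_succ_eq_map]
      simp only [List.foldl_cons, List.foldl_map]
      have h0 : nstep (a :: b :: t) 0 =
          if b < a then b :: a :: t else a :: b :: t := by
        by_cases hba : b < a <;> simp [nstep, hba, List.set]
      rw [h0]
      by_cases hba : b < a
      · simp only [hba, if_pos, bpassK]
        rw [show (fun (l : List Int) t => nstep l (Nat.succ t)) =
              (fun l t => nstep l (t + 1)) from rfl,
            foldl_nstep_cons, ih (a :: t) (by simp at hlt ⊢; omega)]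
      · simp only [hba, if_false, bpassK]
        rw [show (fun (l : List Int) t => nstep l (Nat.succ t)) =
              (fun l t => nstep l (t + 1)) from rfl,
            foldl_nstep_cons, ih (b :: t) (by simp at hlt ⊢; omega)]

lemma bpassK_perm (k : Nat) (l : List Int) : (bpassK k l).Perm l := by
  induction k generalizing l with
  | zero => rfl
  | succ k ih =>
    match l with
    | [] => rfl
    | [a] => rfl
    | a :: b :: t =>
      by_cases hba : b < a
      · simpa [bpassK, hba] using ((ih (a :: t)).cons b).trans (List.Perm.swap a b t)
      · simpa [bpassK, hba] using (ih (b :: t)).cons a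

lemma bpassK_length (k : Nat) (l : List Int) : (bpassK k l).length = l.length :=
  (bpassK_perm k l).length_eq

lemma bpassK_append (k : Nat) (l1 l2 : List Int) (h : k < l1.length) :
    bpassK k (l1 ++ l2) = bpassK k l1 ++ l2 := by
  induction k generalizing l1 with
  | zero => rfl
  | succ k ih =>
    match l1, h with
    | a :: b :: t, h =>
      by_cases hba : b < a
      · simp only [List.cons_append, bpassK, hba, if_pos]
        rw [show a :: (t ++ l2) = (a :: t) ++ l2 from rfl,
          ih (a :: t) (by simp at h ⊢; omega)]
      · simp only [List.cons_append, bpassK, hba, if_false]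
        rw [show b :: (t ++ l2) = (b :: t) ++ l2 from rfl,
          ih (b :: t) (by simp at h ⊢; omega)]

lemma bpassK_max (k : Nat) (l : List Int) (h : l.length = k + 1) :
    ∃ ys M, bpassK k l = ys ++ [M] ∧ ∀ x ∈ l, x ≤ M := by
  induction k generalizing l with
  | zero =>
    match l, h with
    | [a], _ => exact ⟨[], a, rfl, by simp⟩
  | succ k ih =>
    match l, h with
    | a :: b :: t, h =>
      by_cases hba : b < a
      · obtain ⟨ys, M, he, hM⟩ := ih (a :: t) (by simpa using h)
        refine ⟨b :: ys, M, by simp [bpassK, hba, he], ?_⟩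
        intro x hx
        rcases List.mem_cons.mp hx with rfl | hx
        · exact hM x (by simp)
        · rcases List.mem_cons.mp hx with rfl | hx
          · exact le_of_lt (lt_of_lt_of_le hba (hM a (by simp)))
          · exact hM x (by simp [hx])
      · obtain ⟨ys, M, he, hM⟩ := ih (b :: t) (by simpa using h)
        refine ⟨a :: ys, M, by simp [bpassK, hba, he], ?_⟩
        intro x hx
        rcases List.mem_cons.mp hx with rfl | hx
        · exact le_trans (not_lt.mp hba) (hM b (by simp))
        · exact hM x hx

lemma passes_append (k : Nat) (ys rest : List Int) (h : k < ys.length) :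
    passes k (ys ++ rest) = passes k ys ++ rest := by
  induction k generalizing ys with
  | zero => rfl
  | succ k ih =>
    simp only [passes]
    rw [bpassK_append (k + 1) ys rest h,
      ih (bpassK (k + 1) ys) (by rw [bpassK_length]; omega)]

lemma passes_sorted (k : Nat) (l : List Int) (h : l.length = k + 1) :
    (passes k l).Pairwise (· ≤ ·) ∧ (passes k l).Perm l := by
  induction k generalizing l with
  | zero =>
    match l, h with
    | [a], _ => exact ⟨by simp [passes], by rfl⟩
  | succ k ih =>
    obtain ⟨ys, M, he, hM⟩ := bpassK_max (k + 1) l h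
    have hperm : (ys ++ [M]).Perm l := he ▸ bpassK_perm (k + 1) l
    have hyslen : ys.length = k + 1 := by
      have := hperm.length_eq; simp at this; omega
    obtain ⟨ihs, ihp⟩ := ih ys hyslen
    have hstep : passes (k + 1) l = passes k ys ++ [M] := by
      simp only [passes]; rw [he, passes_append k ys [M] (by omega)]
    constructor
    · rw [hstep]
      refine List.pairwise_append.mpr ⟨ihs, by simp, ?_⟩
      intro x hx y hy
      simp only [List.mem_singleton] at hy; subst hy
      exact hM x (hperm.mem_iff.mp (by simp [ihp.mem_iff.mp hx]))
    · rw [hstep]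
      exact (ihp.append_right [M]).trans hperm

-- The Nat-indexed form of A's whole sorting phase.
lemma foldl_passes (K : Nat) (l : List Int) (h : K < l.length ∨ K = 0) :
    (List.range K).foldl (fun l t => (List.range (K - t)).foldl nstep l) l = passes K l := by
  induction K generalizing l with
  | zero => rfl
  | succ K ih =>
    have hlt : K + 1 < l.length := by omega
    rw [List.range_succ_eq_map]
    simp only [List.foldl_cons, List.foldl_map, Nat.sub_zero]
    rw [range_foldl_nstep_eq_bpassK (K + 1) l (Or.inl hlt)]
    have hfun : (fun (l : List Int) (t : Nat) => (List.range (K + 1 - Nat.succ t)).foldl nstep l)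
        = fun l t => (List.range (K - t)).foldl nstep l := by
      funext l t; congr 2; omega
    rw [hfun, ih (bpassK (K + 1) l) (Or.inl (by rw [bpassK_length]; omega))]
    rfl

-- A's flatten comprehension equals List.flatten.
lemma flatten_eq (m : List (List Int)) :
    m.foldl (fun acc fila => fila.foldl (fun acc num => acc ++ [num]) acc) [] = m.flatten := by
  have key : ∀ (acc : List Int),
      m.foldl (fun acc fila => fila.foldl (fun acc num => acc ++ [num]) acc) acc
        = acc ++ m.flatten := by
    induction m with
    | nil => simp
    | cons f fs ih =>
      intro acc
      rw [List.foldl_cons, PySem.List.foldl_append_singleton, ih (acc ++ f),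
        List.flatten_cons, List.append_assoc]
  simpa using key []

-- A's Int-indexed loops reduce to the Nat-indexed form.
lemma ordenar_matriz_eq_passes (m : List (List Int)) :
    ordenar_matriz m = passes (m.flatten.length - 1) m.flatten := by
  simp only [ordenar_matriz, flatten_eq]
  set L := m.flatten with hL
  set N := L.length with hN
  have h1 : PySem.List.pyRange 0 ((N : Int) - 1) 1
      = (List.range (N - 1)).map (fun k => ((k : Nat) : Int)) := by
    rw [PySem.List.pyRange_one]
    have h0 : (((N : Int)) - 1 - 0).toNat = N - 1 := by omega
    rw [h0]
    exact List.map_congr_left (fun k _ => by simp)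
  rw [h1, List.foldl_map]
  refine (List.foldl_ext _ _ L ?_).trans (foldl_passes (N - 1) L ?_)
  · intro l t _
    have h3 : PySem.List.pyRange 0 ((N : Int) - (t : Int) - 1) 1
        = (List.range (N - 1 - t)).map (fun k => ((k : Nat) : Int)) := by
      rw [PySem.List.pyRange_one]
      have h0 : (((N : Int)) - (t : Int) - 1 - 0).toNat = N - 1 - t := by omega
      rw [h0]
      exact List.map_congr_left (fun k _ => by simp)
    rw [h3, List.foldl_map]
    refine List.foldl_ext _ _ l ?_
    intro l' u _
    have hu1 : ((u : Int)) + 1 = (((u + 1 : Nat)) : Int) := by push_cast; ring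
    rw [hu1]
    simp only [nstep, PySem.List.pyGetD_natCast, PySem.List.pySetD_natCast]
  · omega

-- ===== VERDICT (by name: the statement is the Claim_ definition above) =====
theorem ordenar_matriz_spec : Claim_equal_ordenar_matriz := by
  intro m _
  unfold Spec_ordenar_matriz ordenar_matriz_alt
  rw [ordenar_matriz_eq_passes]
  have hfm : m.flatMap (fun fila => fila) = m.flatten := by simp
  rw [hfm]
  rcases Nat.eq_zero_or_pos m.flatten.length with h | h
  · rw [List.length_eq_zero_iff.mp h]
    rfl
  · obtain ⟨hs, hp⟩ := passes_sorted (m.flatten.length - 1) m.flatten (by omega)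
    exact (PySem.List.sorted_id_eq_of_perm_of_pairwise _ _ hp hs).symm
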